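-- pv_equiv track=rewrite | github.com/duilec/CS61A-spring2022 | exercise/mt2_review.py | min_abs_indices
-- ===== SOURCE A (Python) =====
-- def min_abs_indices(s):
--     """Indices of all elements in list s that have the smallest absolute value.
--
--     >>> min_abs_indices([-4, -3, -2, 3, 2, 4])
--     [2, 4]
--     >>> min_abs_indices([1, 2, 3, 4, 5])
--     [0]
--     """
--     smallest_val = abs(s[0])
--     index = []
--     # find the smallest value
--     for val in s:
--         if abs(val) < smallest_val:
--             smallest_val = abs(val)
--     # get index of the smallest value
--     i = 0
--     for val in s:
--         if abs(val) == smallest_val: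
--             smallest_val = abs(val)
--             index += [i]
--         i += 1
--     return index
-- ===== SOURCE B (Python) =====
-- def min_abs_indices(s):
--     smallest = abs(s[0])
--     index = []
--     for i, val in enumerate(s):
--         if abs(val) < smallest:
--             smallest = abs(val)
--             index = [i]
--         elif abs(val) == smallest:
--             index.append(i)
--     return index
-- ===== Notes on version B (the rewrite author's own statement) =====
-- stated objective: alternative
-- what changed: Replaces A's two passes (one to compute the minimum absolute value, a second with a manual counter to collect matching indices) by a single enumerate pass that tracks the current smallest and rebuilds the index list whenever a new minimum appears.
import Mathlib
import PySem

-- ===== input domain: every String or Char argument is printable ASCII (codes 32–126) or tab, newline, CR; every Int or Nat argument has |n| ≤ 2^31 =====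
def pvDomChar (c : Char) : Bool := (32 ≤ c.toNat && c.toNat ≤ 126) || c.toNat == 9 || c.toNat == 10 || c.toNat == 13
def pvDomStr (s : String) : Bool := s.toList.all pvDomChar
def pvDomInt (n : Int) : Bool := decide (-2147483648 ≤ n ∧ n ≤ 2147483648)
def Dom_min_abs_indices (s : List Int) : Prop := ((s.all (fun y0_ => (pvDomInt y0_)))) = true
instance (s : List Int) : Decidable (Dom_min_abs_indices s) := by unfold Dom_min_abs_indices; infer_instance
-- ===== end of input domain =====

-- B replaces A's two passes over s by a single enumerate pass that rebuilds the
-- index list on each new minimum; Pre_ excludes the empty list, on which both raise IndexError.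


-- ===== PORT A =====
-- A: first loop computes the smallest absolute value, second loop (manual counter i)
-- collects the indices whose absolute value equals it (re-assigning smallest_val, a no-op).
def min_abs_indices (s : List Int) : List Int :=
  match s with
  | [] => []  -- unreachable under Pre_: abs(s[0]) raises IndexError in Python
  | h :: _ =>
    let smallest := s.foldl (fun m v => if |v| < m then |v| else m) |h|
    let r := s.foldl
      (fun (p : Int × Int × List Int) v =>
        if |v| = p.1 then (|v|, p.2.1 + 1, p.2.2 ++ [p.2.1]) else (p.1, p.2.1 + 1, p.2.2))
      (smallest, 0, [])
    r.2.2

-- ===== PORT B =====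
-- B: one pass with enumerate; a strictly smaller absolute value resets the index list.
def min_abs_indices_alt (s : List Int) : List Int :=
  match s with
  | [] => []  -- unreachable under Pre_: abs(s[0]) raises IndexError in Python
  | h :: _ =>
    ((PySem.List.enumerate s 0).foldl
      (fun (p : Int × List Int) iv =>
        if |iv.2| < p.1 then (|iv.2|, [iv.1])
        else if |iv.2| = p.1 then (p.1, p.2 ++ [iv.1])
        else p)
      (|h|, [])).2

-- ===== PRECONDITION & SPEC =====
-- Pre_ excludes exactly the empty list, where Python A raises IndexError at s[0].
def Pre_min_abs_indices (s : List Int) : Prop := s ≠ []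
instance (s : List Int) : Decidable (Pre_min_abs_indices s) := by unfold Pre_min_abs_indices; infer_instance
def pvWitness_min_abs_indices : List Int := [-4, -3, -2, 3, 2, 4]

def Spec_min_abs_indices (s : List Int) (out : List Int) : Prop := out = min_abs_indices_alt s
instance (s : List Int) (out : List Int) : Decidable (Spec_min_abs_indices s out) := by unfold Spec_min_abs_indices; infer_instance

-- ===== CLAIM (what is proved, stated in full; the proofs are below) =====
def Claim_equal_min_abs_indices : Prop := ∀ (s : List Int), Dom_min_abs_indices s → Pre_min_abs_indices s → Spec_min_abs_indices s (min_abs_indices s)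

-- ===== LEMMAS AND PROOFS =====

-- indices (starting at i) of elements of t whose absolute value is m
def idxList (t : List Int) (m i : Int) : List Int :=
  match t with
  | [] => []
  | v :: t => if |v| = m then i :: idxList t m (i + 1) else idxList t m (i + 1)

-- running minimum of absolute values (A's first loop)
def minAbs (t : List Int) (m : Int) : Int :=
  t.foldl (fun m v => if |v| < m then |v| else m) m

theorem minAbs_cons (v : Int) (t : List Int) (m : Int) :
    minAbs (v :: t) m = minAbs t (if |v| < m then |v| else m) := rfl

theorem minAbs_le (t : List Int) (m : Int) : minAbs t m ≤ m := by
  induction t generalizing m with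
  | nil => simp [minAbs]
  | cons v t ih =>
    rw [minAbs_cons]
    split
    · exact le_trans (ih _) (by omega)
    · exact ih _

-- A's second loop collects acc ++ idxList t m i (the first component stays m).
theorem foldA_eq (t : List Int) (m i : Int) (acc : List Int) :
    (t.foldl
      (fun (p : Int × Int × List Int) v =>
        if |v| = p.1 then (|v|, p.2.1 + 1, p.2.2 ++ [p.2.1]) else (p.1, p.2.1 + 1, p.2.2))
      (m, i, acc)).2.2 = acc ++ idxList t m i := by
  induction t generalizing i acc with
  | nil => simp [idxList]
  | cons v t ih =>
    rw [List.foldl_cons]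
    by_cases h : |v| = m
    · rw [if_pos h, h, ih, idxList, if_pos h]
      simp
    · rw [if_neg h, ih, idxList, if_neg h]

-- B's single pass: final smallest is minAbs t m, and the index list is acc only if
-- the minimum never dropped below m, followed by all indices achieving the minimum.
theorem foldB_eq (t : List Int) (m i : Int) (acc : List Int) :
    (PySem.List.enumerate t i).foldl
      (fun (p : Int × List Int) iv =>
        if |iv.2| < p.1 then (|iv.2|, [iv.1])
        else if |iv.2| = p.1 then (p.1, p.2 ++ [iv.1])
        else p)
      (m, acc)
    = (minAbs t m, (if minAbs t m = m then acc else []) ++ idxList t (minAbs t m) i) := by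
  induction t generalizing m i acc with
  | nil => simp [minAbs, idxList]
  | cons v t ih =>
    rw [PySem.List.enumerate_cons, List.foldl_cons, minAbs_cons]
    by_cases hlt : |v| < m
    · rw [if_pos hlt, if_pos hlt, ih]
      have hle : minAbs t |v| ≤ |v| := minAbs_le t |v|
      rw [if_neg (by omega : ¬ minAbs t |v| = m), idxList]
      by_cases he : |v| = minAbs t |v|
      · rw [if_pos he.symm, if_pos he]; simp
      · rw [if_neg (fun hh => he hh.symm), if_neg he]
    · rw [if_neg hlt, if_neg hlt]
      have hle : minAbs t m ≤ m := minAbs_le t m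
      by_cases heq : |v| = m
      · rw [if_pos heq, ih, idxList]
        by_cases hm : minAbs t m = m
        · rw [if_pos hm, if_pos hm, if_pos (heq.trans hm.symm)]; simp
        · rw [if_neg hm, if_neg hm, if_neg (by omega : ¬ |v| = minAbs t m)]
      · rw [if_neg heq, ih, idxList, if_neg (by omega : ¬ |v| = minAbs t m)]

-- ===== VERDICT (by name: the statement is the Claim_ definition above) =====
theorem min_abs_indices_spec : Claim_equal_min_abs_indices := by
  intro s _ hpre
  unfold Spec_min_abs_indices
  match s with
  | [] => exact absurd rfl hpre
  | h :: t =>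
    show min_abs_indices (h :: t) = min_abs_indices_alt (h :: t)
    unfold min_abs_indices min_abs_indices_alt
    simp only
    rw [foldA_eq, foldB_eq]
    show idxList (h :: t) (minAbs (h :: t) |h|) 0
      = ((if minAbs (h :: t) |h| = |h| then ([] : List Int) else []) ++ idxList (h :: t) (minAbs (h :: t) |h|) 0)
    split <;> simp
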